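-- pv_equiv track=rewrite | github.com/scikit-allel/skallel-tensor | src/skallel/model/functions.py | get_variants_array_names
-- ===== SOURCE A (Python) =====
-- VCF_FIXED_FIELDS = ["CHROM", "POS", "ID", "REF", "ALT", "QUAL"]
--
-- def get_variants_array_names(variants, names=None):
--
--     # discover array keys
--     all_names = sorted(variants)
--
--     if names is None:
--         # return all names, reordering so VCF fixed fields are first
--         names = [k for k in VCF_FIXED_FIELDS if k in all_names]
--         names += [k for k in all_names if k.startswith("FILTER")]
--         names += [k for k in all_names if k not in names]
--
--     else:
--         # check requested keys are present in data
--         for n in names: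
--             if n not in all_names:
--                 raise ValueError  # TODO message
--
--     return names
-- ===== SOURCE B (Python) =====
-- VCF_FIXED_FIELDS = ["CHROM", "POS", "ID", "REF", "ALT", "QUAL"]
--
--
-- def _priority(k):
--     # VCF fixed fields first (in canonical order), then FILTER_* fields, then the rest
--     if k in VCF_FIXED_FIELDS:
--         return VCF_FIXED_FIELDS.index(k)
--     if k.startswith("FILTER"):
--         return len(VCF_FIXED_FIELDS)
--     return len(VCF_FIXED_FIELDS) + 1
--
--
-- def get_variants_array_names(variants, names=None):
--
--     all_names = sorted(variants)
--
--     if names is None: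
--         # one stable sort by priority bucket replaces the three filtered scans
--         names = sorted(all_names, key=_priority)
--
--     else:
--         for n in names:
--             if n not in all_names:
--                 raise ValueError  # TODO message
--
--     return names
-- ===== Notes on version B (the rewrite author's own statement) =====
-- stated objective: simpler
-- what changed: The names-is-None branch's three sequential filtered scans (fixed fields, FILTER-prefixed, remainder) are replaced by one stable sort of the already-sorted names under a priority key (fixed-field index, 6 for FILTER-prefixed, 7 for the rest); the validation branch is unchanged.
-- outside the precondition, e.g. on get_variants_array_names(['POS', 'POS'], None): A returns ['POS'], B returns ['POS', 'POS']
import Mathlib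
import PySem

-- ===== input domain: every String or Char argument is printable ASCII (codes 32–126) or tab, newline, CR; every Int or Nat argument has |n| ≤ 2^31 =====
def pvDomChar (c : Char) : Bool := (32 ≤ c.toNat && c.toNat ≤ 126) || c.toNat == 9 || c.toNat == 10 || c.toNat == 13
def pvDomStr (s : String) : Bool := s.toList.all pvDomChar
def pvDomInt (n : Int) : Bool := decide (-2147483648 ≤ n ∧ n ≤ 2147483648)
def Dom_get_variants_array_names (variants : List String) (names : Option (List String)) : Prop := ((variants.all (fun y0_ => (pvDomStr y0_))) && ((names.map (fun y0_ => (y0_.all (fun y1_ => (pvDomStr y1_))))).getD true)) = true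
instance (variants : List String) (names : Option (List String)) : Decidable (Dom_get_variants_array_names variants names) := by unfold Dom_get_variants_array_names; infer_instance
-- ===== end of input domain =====

-- B replaces the three filtered scans of the names-is-None branch by one stable sort under a
-- priority key (simpler decomposition); the validation branch is unchanged.


-- ===== PORT A =====
def vcfFixedFields : List String := ["CHROM", "POS", "ID", "REF", "ALT", "QUAL"]

def get_variants_array_names (variants : List String) (names : Option (List String)) : List String :=
  let all_names := PySem.List.sorted variants (fun k => k)
  match names with
  | none =>
    -- names = [k for k in VCF_FIXED_FIELDS if k in all_names]
    let ns1 := vcfFixedFields.filter (fun k => decide (k ∈ all_names))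
    -- names += [k for k in all_names if k.startswith("FILTER")]
    let ns2 := ns1 ++ all_names.filter (fun k => PySem.Str.startswith k "FILTER")
    -- names += [k for k in all_names if k not in names]
    ns2 ++ all_names.filter (fun k => decide (k ∉ ns2))
  | some ns =>
    -- the loop only validates; 'raise ValueError' (some n not in all_names) is excluded by Pre_, ported as []
    if ns.all (fun n => decide (n ∈ all_names)) then ns else []

-- ===== PORT B =====
def vcfPriority (k : String) : Int :=
  if k ∈ vcfFixedFields then ((PySem.List.index? vcfFixedFields k).getD 0 : Nat)  -- .index cannot fail here
  else if PySem.Str.startswith k "FILTER" then (vcfFixedFields.length : Int)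
  else (vcfFixedFields.length : Int) + 1

def get_variants_array_names_alt (variants : List String) (names : Option (List String)) : List String :=
  let all_names := PySem.List.sorted variants (fun k => k)
  match names with
  | none =>
    -- one stable sort by priority bucket replaces the three filtered scans
    PySem.List.sorted all_names vcfPriority
  | some ns =>
    -- unchanged validation branch; 'raise ValueError' is excluded by Pre_, ported as []
    if ns.all (fun n => decide (n ∈ all_names)) then ns else []

-- ===== PRECONDITION & SPEC =====
-- Pre_ excludes (a) inputs where A raises ValueError (a requested name absent from variants), and
-- (b) in the names-is-None branch, variant lists in which some VCF fixed field occurs more than once: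
-- there A keeps one copy (its first scan iterates over the fixed-field list) while B keeps every copy;
-- duplicate keys are a corner no caller specifies, and either treatment is defensible.
def Pre_get_variants_array_names (variants : List String) (names : Option (List String)) : Prop :=
  (names.isNone = true → ∀ k ∈ vcfFixedFields, variants.count k ≤ 1) ∧
  (∀ n ∈ names.getD [], n ∈ variants)
instance (variants : List String) (names : Option (List String)) : Decidable (Pre_get_variants_array_names variants names) := by unfold Pre_get_variants_array_names; infer_instance

def pvWitness_get_variants_array_names : List String × Option (List String) :=
  (["zz", "FILTER_PASS", "QUAL", "CHROM", "AF"], none)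

def Spec_get_variants_array_names (variants : List String) (names : Option (List String)) (out : List String) : Prop := out = get_variants_array_names_alt variants names
instance (variants : List String) (names : Option (List String)) (out : List String) : Decidable (Spec_get_variants_array_names variants names out) := by unfold Spec_get_variants_array_names; infer_instance

-- ===== CLAIM (what is proved, stated in full; the proofs are below) =====
def Claim_equal_get_variants_array_names : Prop := ∀ (variants : List String) (names : Option (List String)), Dom_get_variants_array_names variants names → Pre_get_variants_array_names variants names → Spec_get_variants_array_names variants names (get_variants_array_names variants names)

-- ===== LEMMAS AND PROOFS =====

-- the priority key takes values in [0, 8)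
lemma vcfPriority_bounds (x : String) : 0 ≤ vcfPriority x ∧ vcfPriority x < 8 := by
  by_cases h : x ∈ vcfFixedFields
  · fin_cases h <;> decide
  · unfold vcfPriority
    rw [if_neg h]
    by_cases hs : PySem.Str.startswith x "FILTER" = true
    · rw [if_pos hs]; decide
    · rw [if_neg hs]; decide

-- insertBy walks past a prefix none of whose elements trigger 'before'
lemma insertBy_append_not {A : Type} (b : A -> A -> Bool) (x : A) (ys zs : List A)
    (h : forall y, y ∈ ys -> b x y = false) :
    PySem.List.insertBy b x (ys ++ zs) = ys ++ PySem.List.insertBy b x zs := by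
  induction ys with
  | nil => rfl
  | cons y t ih =>
    have hy : b x y = false := h y (by simp)
    simp [PySem.List.insertBy, hy, ih (fun z hz => h z (by simp [hz]))]

-- insertBy puts x in front when every element triggers 'before'
lemma insertBy_all_before {A : Type} (b : A -> A -> Bool) (x : A) (zs : List A)
    (h : forall y, y ∈ zs -> b x y = true) :
    PySem.List.insertBy b x zs = x :: zs := by
  cases zs with
  | nil => rfl
  | cons z t => simp [PySem.List.insertBy, h z (by simp)]

-- a stable sort by an Int key with values in [0, N) is the concatenation of the key's fibers
lemma sorted_eq_flatMap_groups {A : Type} [DecidableEq A] (key : A -> Int) (N : Nat) (l : List A)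
    (hb : forall x, 0 ≤ key x ∧ key x < N) :
    PySem.List.sorted l key = (List.range N).flatMap (fun (i : Nat) => l.filter (fun x => decide (key x = (i : Int)))) := by
  induction l using List.reverseRecOn with
  | nil =>
    rw [show PySem.List.sorted ([] : List A) key = [] from rfl]
    symm
    apply List.flatMap_eq_nil_iff.mpr
    intro i _
    rfl
  | append_singleton l x ih =>
    rw [PySem.List.sorted_eq_foldl_insertBy, List.foldl_append, ← PySem.List.sorted_eq_foldl_insertBy, ih]
    obtain ⟨h0, hN⟩ := hb x
    set k : Nat := (key x).toNat with hk
    have hkx : key x = (k : Int) := by omega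
    have hkN : k < N := by omega
    obtain ⟨M, rfl⟩ : ∃ M, N = (k + 1) + M := ⟨N - (k+1), by omega⟩
    have hsplit : List.range ((k+1) + M) = (List.range k ++ [k]) ++ ((List.range M).map (fun j => (k+1) + j)) := by
      rw [List.range_add, List.range_succ]
    have hfilter_app : forall (i : Int), (l ++ [x]).filter (fun y => decide (key y = i)) =
        l.filter (fun y => decide (key y = i)) ++ (if key x = i then [x] else []) := by
      intro i; rw [List.filter_append]; by_cases hpx : key x = i <;> simp [List.filter, hpx]
    rw [hsplit]
    simp only [List.flatMap_append, List.flatMap_cons, List.flatMap_nil, List.flatMap_map, List.append_nil, List.append_assoc]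
    simp only [List.foldl_cons, List.foldl_nil]
    rw [insertBy_append_not _ x _ _ (by
      intro y hy
      simp only [List.mem_flatMap, List.mem_range] at hy
      obtain ⟨i, hiN, hyi⟩ := hy
      have hky := List.of_mem_filter hyi
      simp only [decide_eq_true_eq] at hky
      simp only [decide_eq_false_iff_not, not_lt, hky, hkx]
      exact_mod_cast Nat.le_of_lt hiN)]
    rw [insertBy_append_not _ x _ _ (by
      intro y hy
      have hky := List.of_mem_filter hy
      simp only [decide_eq_true_eq] at hky
      simp [hky, hkx])]
    rw [insertBy_all_before _ x _ (by
      intro y hy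
      simp only [List.mem_flatMap, List.mem_range] at hy
      obtain ⟨i, hiN, hyi⟩ := hy
      have hky := List.of_mem_filter hyi
      simp only [decide_eq_true_eq] at hky
      simp only [decide_eq_true_eq, hky, hkx]
      push_cast; omega)]
    have e1 : (List.range k).flatMap (fun (i : Nat) => (l ++ [x]).filter (fun y => decide (key y = (i : Int)))) =
        (List.range k).flatMap (fun (i : Nat) => l.filter (fun y => decide (key y = (i : Int)))) := by
      apply List.flatMap_congr
      intro i hi
      rw [hfilter_app, if_neg (by simp only [List.mem_range] at hi; omega), List.append_nil]
    have e2 : (l ++ [x]).filter (fun y => decide (key y = (k : Int))) =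
        l.filter (fun y => decide (key y = (k : Int))) ++ [x] := by
      rw [hfilter_app, if_pos hkx]
    have e3 : (List.range M).flatMap (fun (i : Nat) => (l ++ [x]).filter (fun y => decide (key y = (((k+1) + i : Nat) : Int)))) =
        (List.range M).flatMap (fun (i : Nat) => l.filter (fun y => decide (key y = (((k+1) + i : Nat) : Int)))) := by
      apply List.flatMap_congr
      intro i hi
      rw [hfilter_app, if_neg (by push_cast; omega), List.append_nil]
    rw [e1, e2, e3]
    simp

-- vcfPriority characterized on each bucket
lemma vcfPriority_eq_of_fixed (x : String) (hx : x ∈ vcfFixedFields) :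
    (x = "CHROM" ∧ vcfPriority x = 0) ∨ (x = "POS" ∧ vcfPriority x = 1) ∨
    (x = "ID" ∧ vcfPriority x = 2) ∨ (x = "REF" ∧ vcfPriority x = 3) ∨
    (x = "ALT" ∧ vcfPriority x = 4) ∨ (x = "QUAL" ∧ vcfPriority x = 5) := by
  fin_cases hx <;> decide

lemma fixed_not_startswith (x : String) (hx : x ∈ vcfFixedFields) :
    PySem.Str.startswith x "FILTER" = false := by
  fin_cases hx <;> decide

lemma vcfPriority_eq_six_iff (x : String) :
    vcfPriority x = 6 ↔ PySem.Str.startswith x "FILTER" = true := by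
  constructor
  · intro h
    by_cases hm : x ∈ vcfFixedFields
    · rcases vcfPriority_eq_of_fixed x hm with ⟨_, e⟩ | ⟨_, e⟩ | ⟨_, e⟩ | ⟨_, e⟩ | ⟨_, e⟩ | ⟨_, e⟩ <;> omega
    · unfold vcfPriority at h
      rw [if_neg hm] at h
      by_cases hs : PySem.Str.startswith x "FILTER" = true
      · exact hs
      · rw [if_neg hs] at h; exact absurd h (by decide)
  · intro hs
    have hm : x ∉ vcfFixedFields := by
      intro hmem
      rw [fixed_not_startswith x hmem] at hs; cases hs
    unfold vcfPriority
    rw [if_neg hm, if_pos hs]; rfl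

lemma vcfPriority_lt_six_iff (x : String) (i : Nat) (hi : i < 6) :
    vcfPriority x = (i : Int) ↔ x = vcfFixedFields[i]! := by
  constructor
  · intro h
    by_cases hm : x ∈ vcfFixedFields
    · rcases vcfPriority_eq_of_fixed x hm with ⟨e, e'⟩ | ⟨e, e'⟩ | ⟨e, e'⟩ | ⟨e, e'⟩ | ⟨e, e'⟩ | ⟨e, e'⟩ <;>
        (subst e; rw [e'] at h; interval_cases i <;> first | (exact absurd h (by decide)) | decide)
    · unfold vcfPriority at h
      rw [if_neg hm] at h
      split at h <;> (simp only [vcfFixedFields, List.length_cons, List.length_nil] at h; omega)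
  · intro h
    interval_cases i <;> (subst h; decide)

lemma vcfPriority_eq_seven_iff (x : String) :
    vcfPriority x = 7 ↔ (x ∉ vcfFixedFields ∧ PySem.Str.startswith x "FILTER" = false) := by
  constructor
  · intro h
    by_cases hm : x ∈ vcfFixedFields
    · rcases vcfPriority_eq_of_fixed x hm with ⟨_, e⟩ | ⟨_, e⟩ | ⟨_, e⟩ | ⟨_, e⟩ | ⟨_, e⟩ | ⟨_, e⟩ <;> omega
    · refine ⟨hm, ?_⟩
      by_cases hs : PySem.Str.startswith x "FILTER" = true
      · rw [(vcfPriority_eq_six_iff x).2 hs] at h; omega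
      · simpa using hs
  · rintro ⟨hm, hs⟩
    unfold vcfPriority
    rw [if_neg hm, if_neg (by rw [hs]; exact Bool.false_ne_true)]; rfl

-- the fiber of a fixed field is [field] or [] when the field occurs at most once
lemma fiber_fixed (l : List String) (i : Nat) (hi : i < 6)
    (hc : List.count (vcfFixedFields[i]!) l ≤ 1) :
    l.filter (fun x => decide (vcfPriority x = (i : Int))) =
      if vcfFixedFields[i]! ∈ l then [vcfFixedFields[i]!] else [] := by
  have : l.filter (fun x => decide (vcfPriority x = (i : Int))) =
      l.filter (fun x => decide (x = vcfFixedFields[i]!)) := by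
    apply List.filter_congr
    intro x _
    simp only [decide_eq_decide]
    exact vcfPriority_lt_six_iff x i hi
  rw [this, List.filter_eq]
  by_cases hm : vcfFixedFields[i]! ∈ l
  · have h1 : List.count (vcfFixedFields[i]!) l = 1 := by
      have := List.count_pos_iff.2 hm
      omega
    rw [if_pos hm, h1]; rfl
  · rw [if_neg hm, List.count_eq_zero_of_not_mem hm]; rfl

-- ===== VERDICT (by name: the statement is the Claim_ definition above) =====
theorem get_variants_array_names_spec : Claim_equal_get_variants_array_names := by
  intro variants names _hdom hpre
  unfold Spec_get_variants_array_names
  obtain ⟨hdup, _⟩ := hpre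
  cases names with
  | some ns => rfl
  | none =>
    simp only [get_variants_array_names, get_variants_array_names_alt]
    set all := PySem.List.sorted variants (fun k => k) with hall
    have hperm : all.Perm variants := PySem.List.sorted_perm variants (fun k => k) false
    have hcnt : forall kk, kk ∈ vcfFixedFields -> List.count kk all ≤ 1 := by
      intro kk hk
      rw [hperm.count_eq]
      exact hdup rfl kk hk
    -- B side: sort = concatenation of the 8 priority fibers
    rw [sorted_eq_flatMap_groups vcfPriority 8 all vcfPriority_bounds]
    have hrange : List.range 8 = [0,1,2,3,4,5,6,7] := by decide
    rw [hrange]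
    simp only [List.flatMap_cons, List.flatMap_nil, List.append_nil]
    -- fibers 0..5
    have f0 := fiber_fixed all 0 (by omega) (hcnt _ (by decide))
    have f1 := fiber_fixed all 1 (by omega) (hcnt _ (by decide))
    have f2 := fiber_fixed all 2 (by omega) (hcnt _ (by decide))
    have f3 := fiber_fixed all 3 (by omega) (hcnt _ (by decide))
    have f4 := fiber_fixed all 4 (by omega) (hcnt _ (by decide))
    have f5 := fiber_fixed all 5 (by omega) (hcnt _ (by decide))
    simp only [vcfFixedFields, List.getElem!_cons_zero, List.getElem!_cons_succ] at f0 f1 f2 f3 f4 f5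
    -- fiber 6 is the FILTER bucket
    have f6 : all.filter (fun x => decide (vcfPriority x = ((6 : Nat) : Int))) =
        all.filter (fun kk => PySem.Str.startswith kk "FILTER") := by
      apply List.filter_congr
      intro x _
      rcases Bool.eq_false_or_eq_true (PySem.Str.startswith x "FILTER") with hs | hs
      all_goals simp [hs, vcfPriority_eq_six_iff]
    -- the first scan over the literal fixed-field list, written out
    have hns1 : vcfFixedFields.filter (fun kk => decide (kk ∈ all)) =
        (if "CHROM" ∈ all then ["CHROM"] else []) ++ (if "POS" ∈ all then ["POS"] else []) ++
        (if "ID" ∈ all then ["ID"] else []) ++ (if "REF" ∈ all then ["REF"] else []) ++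
        (if "ALT" ∈ all then ["ALT"] else []) ++ (if "QUAL" ∈ all then ["QUAL"] else []) := by
      simp only [vcfFixedFields, List.filter_cons, List.filter_nil, decide_eq_true_eq]
      split_ifs <;> simp
    -- fiber 7 is the leftover bucket: not already placed by the first two scans
    have f7 : all.filter (fun x => decide (vcfPriority x = ((7 : Nat) : Int))) =
        all.filter (fun kk => decide (kk ∉ vcfFixedFields.filter (fun k2 => decide (k2 ∈ all)) ++
          all.filter (fun k2 => PySem.Str.startswith k2 "FILTER"))) := by
      apply List.filter_congr
      intro x hx
      simp only [show ((7:Nat):Int) = (7:Int) from rfl, decide_eq_decide, vcfPriority_eq_seven_iff,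
        List.mem_append, List.mem_filter, decide_eq_true_eq, not_or, not_and, Bool.not_eq_true]
      tauto
    rw [f0, f1, f2, f3, f4, f5, f6, f7, hns1]
    simp [List.append_assoc]
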